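-- pv_equiv track=rewrite | github.com/dafandikri/DDP1 | Tugas/Pengerjaan/TP3/tp3_coba.py | select_cols
-- ===== SOURCE A (Python) =====
-- def select_cols(dataframe, selected_cols):
--   data, column_names, column_types = dataframe
--
--   if not selected_cols:
--     raise Exception("Parameter selected_cols tidak boleh kosong.")
--
--   for selected_col in selected_cols:
--     if selected_col not in column_names:
--       raise Exception(f"Kolom {selected_col} tidak ditemukan.")
--
--   new_data = []
--   new_column_names = []
--   new_column_types = []
--
--   for i, col_name in enumerate(column_names):
--     if col_name in selected_cols:
--       new_column_names.append(col_name)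
--       new_column_types.append(column_types[i])
--       new_data.append([row[i] for row in data])
--
--   return new_data, new_column_names, new_column_types
-- ===== SOURCE B (Python) =====
-- def select_cols(dataframe, selected_cols):
--     data, column_names, column_types = dataframe
--
--     if not selected_cols:
--         raise Exception("Parameter selected_cols tidak boleh kosong.")
--
--     for selected_col in selected_cols:
--         if selected_col not in column_names:
--             raise Exception(f"Kolom {selected_col} tidak ditemukan.")
--
--     keep = [i for i, name in enumerate(column_names) if name in selected_cols]
--     new_column_names = [column_names[i] for i in keep]
--     new_column_types = [column_types[i] for i in keep]
--
--     projected_rows = [[row[i] for i in keep] for row in data]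
--     if data:
--         new_data = [list(col) for col in zip(*projected_rows)]
--     else:
--         new_data = [[] for _ in keep]
--
--     return new_data, new_column_names, new_column_types
-- ===== Notes on version B (the rewrite author's own statement) =====
-- stated objective: alternative
-- what changed: B computes the kept column indices once, projects every row in a single row-major pass, and recovers the output columns by transposing with zip(*projected_rows) instead of building each column with its own pass over data.
import Mathlib
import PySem

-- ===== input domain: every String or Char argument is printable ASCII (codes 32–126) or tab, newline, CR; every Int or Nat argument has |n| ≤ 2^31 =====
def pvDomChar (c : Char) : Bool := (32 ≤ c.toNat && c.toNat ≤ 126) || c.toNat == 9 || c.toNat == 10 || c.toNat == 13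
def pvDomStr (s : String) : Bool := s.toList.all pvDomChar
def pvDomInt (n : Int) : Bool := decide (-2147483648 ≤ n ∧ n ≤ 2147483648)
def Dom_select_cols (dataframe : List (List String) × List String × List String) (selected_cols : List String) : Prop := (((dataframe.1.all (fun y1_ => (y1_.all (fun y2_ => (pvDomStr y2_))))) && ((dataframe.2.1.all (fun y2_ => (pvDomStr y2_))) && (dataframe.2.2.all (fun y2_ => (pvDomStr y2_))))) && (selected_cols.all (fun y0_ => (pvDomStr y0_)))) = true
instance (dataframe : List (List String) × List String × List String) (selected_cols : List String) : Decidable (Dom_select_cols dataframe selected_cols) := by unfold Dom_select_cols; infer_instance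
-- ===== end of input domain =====

-- B selects the kept column indices once, projects the rows in one row-major pass and
-- transposes (zip(*rows)) to recover the columns, instead of one pass over data per kept
-- column as in A; alternative decomposition, same asymptotic cost.

-- ===== PORT A =====
def select_cols (dataframe : List (List String) × List String × List String) (selected_cols : List String) : List (List String) × List String × List String :=
  let data := dataframe.1
  let column_names := dataframe.2.1
  let column_types := dataframe.2.2
  -- the two validation loops raise outside Pre_; inside Pre_ they are no-ops
  (PySem.List.enumerate column_names 0).foldl (fun acc p =>
    if selected_cols.contains p.2 then
      (acc.1 ++ [data.map (fun row => PySem.List.pyGetD row p.1 "")],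
       acc.2.1 ++ [p.2],
       acc.2.2 ++ [PySem.List.pyGetD column_types p.1 ""])
    else acc) ([], [], [])

-- ===== PORT B =====
-- termination measure helper for zipStarS
theorem pvTailSum_le (rs : List (List String)) :
    ((rs.map List.tail).map List.length).sum ≤ (rs.map List.length).sum := by
  induction rs with
  | nil => simp
  | cons x xs ih =>
    simp only [List.map_cons, List.map_map, List.sum_cons, Function.comp_def] at ih ⊢
    have hx : x.tail.length ≤ x.length := by cases x <;> simp
    omega

-- zip(*rows): take heads while every row is nonempty (exact Python zip truncation rule)
def zipStarS (rows : List (List String)) : List (List String) :=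
  if h : rows ≠ [] ∧ rows.all (fun r => !r.isEmpty) then
    rows.map (fun r => r.headD "") :: zipStarS (rows.map List.tail)
  else []
termination_by (rows.map List.length).sum
decreasing_by
  obtain ⟨hne, hall⟩ := h
  match rows, hne, hall with
  | r :: rs, _, hall =>
    have hr : r ≠ [] := by
      simp only [List.all_cons, Bool.and_eq_true] at hall
      cases r <;> simp_all
    have h1 : r.tail.length < r.length := by
      cases r with
      | nil => exact absurd rfl hr
      | cons a as => simp
    have h2 := pvTailSum_le rs
    simp [Function.comp_def] at h2 ⊢
    omega

def select_cols_alt (dataframe : List (List String) × List String × List String) (selected_cols : List String) : List (List String) × List String × List String :=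
  let data := dataframe.1
  let column_names := dataframe.2.1
  let column_types := dataframe.2.2
  let keep := (PySem.List.enumerate column_names 0).filterMap
    (fun p => if selected_cols.contains p.2 then some p.1 else none)
  let newNames := keep.map (fun i => PySem.List.pyGetD column_names i "")
  let newTypes := keep.map (fun i => PySem.List.pyGetD column_types i "")
  let projected := data.map (fun row => keep.map (fun i => PySem.List.pyGetD row i ""))
  let newData := if data.isEmpty then keep.map (fun _ => ([] : List String)) else zipStarS projected
  (newData, newNames, newTypes)

-- ===== PRECONDITION & SPEC =====
-- Pre_ excludes exactly the inputs on which A raises: an empty selected_cols or a selected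
-- column missing from column_names (explicit Exception), and kept indices out of range of
-- column_types or of some data row (IndexError).
def Pre_select_cols (dataframe : List (List String) × List String × List String) (selected_cols : List String) : Prop :=
  selected_cols ≠ [] ∧ (∀ c ∈ selected_cols, c ∈ dataframe.2.1) ∧
  ∀ p ∈ PySem.List.enumerate dataframe.2.1 0, p.2 ∈ selected_cols →
    (p.1 < (dataframe.2.2.length : Int) ∧ ∀ row ∈ dataframe.1, p.1 < (row.length : Int))
instance (dataframe : List (List String) × List String × List String) (selected_cols : List String) : Decidable (Pre_select_cols dataframe selected_cols) := by unfold Pre_select_cols; infer_instance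

def pvWitness_select_cols : (List (List String) × List String × List String) × List String :=
  (([["1", "x"], ["2", "y"]], ["a", "b"], ["int", "str"]), ["b"])

def Spec_select_cols (dataframe : List (List String) × List String × List String) (selected_cols : List String) (out : List (List String) × List String × List String) : Prop := out = select_cols_alt dataframe selected_cols
instance (dataframe : List (List String) × List String × List String) (selected_cols : List String) (out : List (List String) × List String × List String) : Decidable (Spec_select_cols dataframe selected_cols out) := by unfold Spec_select_cols; infer_instance

-- ===== CLAIM (what is proved, stated in full; the proofs are below) =====
def Claim_equal_select_cols : Prop := ∀ (dataframe : List (List String) × List String × List String) (selected_cols : List String), Dom_select_cols dataframe selected_cols → Pre_select_cols dataframe selected_cols → Spec_select_cols dataframe selected_cols (select_cols dataframe selected_cols)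

-- ===== LEMMAS AND PROOFS =====

-- A's fold characterised: the three accumulators are filtered maps over the enumerated pairs
theorem foldA_eq (sel : List String) (data : List (List String)) (types : List String)
    (ps : List (Int × String)) (a1 : List (List String)) (a2 a3 : List String) :
    ps.foldl (fun acc p =>
      if sel.contains p.2 then
        (acc.1 ++ [data.map (fun row => PySem.List.pyGetD row p.1 "")],
         acc.2.1 ++ [p.2],
         acc.2.2 ++ [PySem.List.pyGetD types p.1 ""])
      else acc) (a1, a2, a3) =
    (a1 ++ (ps.filterMap (fun p => if sel.contains p.2 then some p.1 else none)).map
            (fun i => data.map (fun row => PySem.List.pyGetD row i "")),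
     a2 ++ (ps.filter (fun p => sel.contains p.2)).map (·.2),
     a3 ++ (ps.filterMap (fun p => if sel.contains p.2 then some p.1 else none)).map
            (fun i => PySem.List.pyGetD types i "")) := by
  induction ps generalizing a1 a2 a3 with
  | nil => simp
  | cons p ps ih =>
    by_cases h : sel.contains p.2
    · simp only [List.foldl_cons, h, if_true, List.filterMap_cons, List.filter_cons, ih,
        List.map_cons, List.append_assoc, List.cons_append, List.nil_append]
    · simp only [List.foldl_cons, h, if_false, List.filterMap_cons, List.filter_cons, ih,
        Bool.false_eq_true]

-- indexing back into the source list recovers the filtered names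
theorem keep_map_eq_filter_snd (sel : List String) (f : Int → String)
    (ps : List (Int × String)) (hf : ∀ p ∈ ps, f p.1 = p.2) :
    (ps.filterMap (fun p => if sel.contains p.2 then some p.1 else none)).map f =
      (ps.filter (fun p => sel.contains p.2)).map (·.2) := by
  induction ps with
  | nil => simp
  | cons p ps ih =>
    have hp : f p.1 = p.2 := hf p (List.mem_cons_self ..)
    have hps : ∀ q ∈ ps, f q.1 = q.2 := fun q hq => hf q (List.mem_cons_of_mem _ hq)
    cases h : sel.contains p.2 with
    | true =>
      simp only [List.filterMap_cons, List.filter_cons, h, if_true, List.map_cons, ih hps, hp]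
    | false =>
      simp only [List.filterMap_cons, List.filter_cons, h, Bool.false_eq_true, if_false, ih hps]

theorem pyGetD_enumerate (names : List String) (p : Int × String)
    (hp : p ∈ PySem.List.enumerate names 0) : PySem.List.pyGetD names p.1 "" = p.2 := by
  rw [PySem.List.mem_enumerate_iff] at hp
  obtain ⟨k, hk, rfl⟩ := hp
  simp [PySem.List.pyGetD_natCast, List.getD_eq_getElem?_getD, hk]

-- transposing the row-major projection yields the column-major projection (data nonempty)
theorem zipStarS_proj (g : List String → Int → String) (data : List (List String))
    (hd : data ≠ []) (K : List Int) :
    zipStarS (data.map (fun row => K.map (g row))) =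
      K.map (fun i => data.map (fun row => g row i)) := by
  induction K generalizing data with
  | nil =>
    rw [zipStarS, dif_neg]
    · simp
    · rintro ⟨-, hall⟩
      obtain ⟨r, hr⟩ := List.exists_mem_of_ne_nil data hd
      simp only [List.all_eq_true, List.mem_map] at hall
      have := hall (List.map (g r) []) ⟨r, hr, rfl⟩
      simp at this
  | cons i ks ih =>
    rw [zipStarS, dif_pos ⟨by simp [hd], by simp⟩]
    have ht : (data.map (fun row => List.map (g row) (i :: ks))).map List.tail =
        data.map (fun row => List.map (g row) ks) := by
      simp [List.map_map, Function.comp_def]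
    have hh : (data.map (fun row => List.map (g row) (i :: ks))).map (fun r => r.headD "") =
        data.map (fun row => g row i) := by
      simp [List.map_map, Function.comp_def]
    rw [ht, hh, ih data hd]
    simp

-- ===== VERDICT (by name: the statement is the Claim_ definition above) =====
theorem select_cols_spec : Claim_equal_select_cols := by
  intro df sel _ _
  unfold Spec_select_cols select_cols select_cols_alt
  obtain ⟨data, names, types⟩ := df
  simp only
  rw [foldA_eq]
  refine Prod.ext ?_ (Prod.ext ?_ ?_)
  · simp only [List.nil_append]
    by_cases hd : data = []
    · subst hd; simp
    · rw [if_neg (by simp [hd]), zipStarS_proj (fun row i => PySem.List.pyGetD row i "") data hd]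
  · simp only [List.nil_append]
    exact (keep_map_eq_filter_snd sel _ _ (fun p hp => pyGetD_enumerate names p hp)).symm
  · simp
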